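-- pv_equiv track=rewrite | github.com/muhannadalghamdi/netrange | netrange/_parser.py | _range_ipaddrs
-- ===== SOURCE A (Python) =====
-- def _range_ipaddrs(ipaddrs):
--     first = last = ipaddrs[0]
--     for next in ipaddrs[1:]:
--         if int(next[3]) - 1 == int(last[3]):
--             last = next
--         else:
--             if first == last:
--                 yield '.'.join(first)
--             else:
--                 yield '.'.join(first) + '-' + last[3]
--             first = last = next
--     if first == last:
--         yield '.'.join(first)
--     else:
--         yield '.'.join(first) + '-' + last[3]
-- ===== SOURCE B (Python) =====
-- def _split_run(prev, rest):
--     """Longest prefix of rest whose 4th octets continue prev's by +1 steps."""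
--     i = 0
--     while i < len(rest) and int(rest[i][3]) == int(prev[3]) + 1:
--         prev = rest[i]
--         i += 1
--     return rest[:i], rest[i:]
--
--
-- def _range_ipaddrs(ipaddrs):
--     rest = ipaddrs
--     while rest:
--         head, rest = rest[0], rest[1:]
--         run, rest = _split_run(head, rest)
--         if not run:
--             yield '.'.join(head)
--         else:
--             yield '.'.join(head) + '-' + run[-1][3]
-- ===== Notes on version B (the rewrite author's own statement) =====
-- stated objective: alternative
-- what changed: Replaces A's single-pass first/last state machine (a fold carrying the open range) by a run-splitting decomposition: a helper peels off the longest consecutive-octet run, the main loop formats one whole run at a time from its head and its last element and recurses on the remainder.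
import Mathlib
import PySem

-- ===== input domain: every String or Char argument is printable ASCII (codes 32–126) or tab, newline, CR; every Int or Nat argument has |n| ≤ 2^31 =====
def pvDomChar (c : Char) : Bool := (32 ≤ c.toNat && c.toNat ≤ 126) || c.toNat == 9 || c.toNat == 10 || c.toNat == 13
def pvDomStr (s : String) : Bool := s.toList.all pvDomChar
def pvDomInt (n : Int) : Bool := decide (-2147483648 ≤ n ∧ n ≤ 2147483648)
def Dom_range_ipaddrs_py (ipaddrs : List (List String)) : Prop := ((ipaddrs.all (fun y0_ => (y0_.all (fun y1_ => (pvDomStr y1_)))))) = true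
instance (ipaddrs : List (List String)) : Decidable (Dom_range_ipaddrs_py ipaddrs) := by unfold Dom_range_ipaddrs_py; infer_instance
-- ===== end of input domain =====

-- B replaces A's running first/last state machine by a run-splitting decomposition
-- (take each maximal consecutive run, format it, recurse on the rest); same cost, and
-- B yields nothing on the empty list where A raises IndexError.


-- ===== PORT A =====
-- int(ip[3]) with the default 0; Pre_ guarantees the parse succeeds wherever A evaluates it
def pvOct (ip : List String) : Int :=
  ((PySem.List.pyGet? ip 3).bind PySem.Int.ofStr?).getD 0

-- '.'.join(ip)
def pvJoin (ip : List String) : String := PySem.Str.join "." ip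

-- ip[3] as the raw string (Pre_ guarantees it exists wherever A evaluates it)
def pvOct3 (ip : List String) : String := (PySem.List.pyGet? ip 3).getD ""

-- the for-loop of A: state (first, last), yields collected in order
def pvLoopA (first last : List String) : List (List String) → List String
  | [] =>
      [if first = last then pvJoin first else pvJoin first ++ "-" ++ pvOct3 last]
  | next :: rest =>
      if pvOct next - 1 = pvOct last then
        pvLoopA first next rest
      else
        (if first = last then pvJoin first else pvJoin first ++ "-" ++ pvOct3 last)
          :: pvLoopA next next rest

def range_ipaddrs_py (ipaddrs : List (List String)) : List String :=
  match ipaddrs with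
  | [] => []  -- ipaddrs[0] raises IndexError here; excluded by Pre_
  | h :: _ => pvLoopA h h (PySem.List.slice ipaddrs (some 1) none)

-- ===== PORT B =====
-- _split_run(prev, rest): longest prefix of rest whose octets continue prev's by +1 steps
def pvSplitRun (prev : List String) : List (List String) → List (List String) × List (List String)
  | [] => ([], [])
  | x :: xs =>
      if pvOct x = pvOct prev + 1 then
        let p := pvSplitRun x xs
        (x :: p.1, p.2)
      else ([], x :: xs)

-- the while-loop of B: peel one run at a time (fuel = list length makes the
-- recursion structural; with fuel ≥ length it never runs out)
def pvEmitRunsB : Nat → List (List String) → List String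
  | _, [] => []
  | 0, _ :: _ => []
  | fuel + 1, x :: xs =>
      let p := pvSplitRun x xs
      (if p.1 = [] then pvJoin x
       else pvJoin x ++ "-" ++ pvOct3 (PySem.List.pyGetD p.1 (-1) []))
        :: pvEmitRunsB fuel p.2

def range_ipaddrs_py_alt (ipaddrs : List (List String)) : List String :=
  pvEmitRunsB ipaddrs.length ipaddrs

-- ===== PRECONDITION & SPEC =====
-- Pre_ excludes exactly the inputs on which A raises: the empty list (IndexError on
-- ipaddrs[0]) and, when there are ≥ 2 addresses, lists with an element whose entry at
-- index 3 is missing or not int()-parsable (IndexError/ValueError in the loop).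
def Pre_range_ipaddrs_py (ipaddrs : List (List String)) : Prop :=
  ipaddrs ≠ [] ∧
    (2 ≤ ipaddrs.length →
      ∀ ip ∈ ipaddrs, ((PySem.List.pyGet? ip 3).bind PySem.Int.ofStr?).isSome = true)
instance (ipaddrs : List (List String)) : Decidable (Pre_range_ipaddrs_py ipaddrs) := by
  unfold Pre_range_ipaddrs_py; infer_instance

def pvWitness_range_ipaddrs_py : List (List String) :=
  [["10", "0", "0", "1"], ["10", "0", "0", "2"], ["10", "0", "0", "7"]]

def Spec_range_ipaddrs_py (ipaddrs : List (List String)) (out : List String) : Prop :=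
  out = range_ipaddrs_py_alt ipaddrs
instance (ipaddrs : List (List String)) (out : List String) : Decidable (Spec_range_ipaddrs_py ipaddrs out) := by
  unfold Spec_range_ipaddrs_py; infer_instance

-- ===== CLAIM (what is proved, stated in full; the proofs are below) =====
def Claim_equal_range_ipaddrs_py : Prop :=
  ∀ (ipaddrs : List (List String)), Dom_range_ipaddrs_py ipaddrs →
    Pre_range_ipaddrs_py ipaddrs →
    Spec_range_ipaddrs_py ipaddrs (range_ipaddrs_py ipaddrs)

-- ===== LEMMAS AND PROOFS =====

-- invariant: first is the head of the current run, last its current end; first = last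
-- exactly while the run is a singleton, otherwise the octets strictly increased
lemma pvLoopA_eq_splitRun :
    ∀ (t : List (List String)) (fuel : Nat) (first last : List String),
      t.length ≤ fuel →
      (first = last ∨ pvOct first < pvOct last) →
      pvLoopA first last t =
        (if (pvSplitRun last t).1 = [] then
           (if first = last then pvJoin first else pvJoin first ++ "-" ++ pvOct3 last)
         else
           pvJoin first ++ "-" ++ pvOct3 (PySem.List.pyGetD (pvSplitRun last t).1 (-1) []))
          :: pvEmitRunsB fuel (pvSplitRun last t).2 := by
  intro t
  induction t with
  | nil => intro fuel first last _ _; cases fuel <;> simp [pvLoopA, pvSplitRun, pvEmitRunsB]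
  | cons next rest ih =>
      intro fuel first last hfuel hinv
      by_cases h : pvOct next - 1 = pvOct last
      · have hc : pvOct next = pvOct last + 1 := by omega
        have hlt : pvOct first < pvOct next := by
          rcases hinv with rfl | hlt <;> omega
        have hne : first ≠ next := fun he => by rw [he] at hlt; exact lt_irrefl _ hlt
        simp only [pvLoopA, if_pos h, pvSplitRun, if_pos hc]
        rw [ih fuel first next (by simpa using Nat.le_of_succ_le hfuel) (Or.inr hlt)]
        by_cases hr : (pvSplitRun next rest).1 = []
        · have hget : PySem.List.pyGetD [next] (-1) ([] : List String) = next := by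
            simp [PySem.List.pyGetD, PySem.List.pyGet?, PySem.List.pyIdx?]
          simp [hr, hne, hget]
        · have hgl : PySem.List.pyGetD (next :: (pvSplitRun next rest).1) (-1) ([] : List String)
              = PySem.List.pyGetD (pvSplitRun next rest).1 (-1) [] := by
            obtain ⟨y, ys, hys⟩ := List.exists_cons_of_ne_nil hr
            rw [hys]
            simp [pysem]
          simp [hr, hgl]
      · have hc : ¬ pvOct next = pvOct last + 1 := by omega
        obtain ⟨f, rfl⟩ : ∃ f, fuel = f + 1 := by
          cases fuel with
          | zero => simp at hfuel
          | succ f => exact ⟨f, rfl⟩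
        simp only [pvLoopA, if_neg h, pvSplitRun, if_neg hc]
        rw [ih f next next (by simp only [List.length_cons] at hfuel; omega) (Or.inl rfl)]
        simp only [pvEmitRunsB]
        simp
-- ===== VERDICT (by name: the statement is the Claim_ definition above) =====
theorem range_ipaddrs_py_spec : Claim_equal_range_ipaddrs_py := by
  intro ipaddrs _ hpre
  unfold Spec_range_ipaddrs_py
  match ipaddrs with
  | [] => exact absurd rfl hpre.1
  | h :: t =>
      show pvLoopA h h (PySem.List.slice (h :: t) (some 1) none) = range_ipaddrs_py_alt (h :: t)
      have hslice : PySem.List.slice (h :: t) (some 1) none = t := by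
        have := PySem.List.slice_from_natCast (xs := h :: t) (a := 1)
        simpa using this
      rw [hslice, pvLoopA_eq_splitRun t t.length h h le_rfl (Or.inl rfl)]
      show _ = pvEmitRunsB (t.length + 1) (h :: t)
      simp only [pvEmitRunsB]
      simp
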